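-- pv_equiv track=rewrite | github.com/chlomcneill/advent-of-code-2015 | Day5/Day5Part2.py | remove_overlapping_pairs
-- ===== SOURCE A (Python) =====
-- def find_pairs_of_letters(string):
--     pairs_of_letters = []
--     i = 0
--     while i < (len(string)-1):
--         pairs_of_letters.append(string[i] + string[i+1])
--         i += 1
--     return pairs_of_letters
--
-- def remove_overlapping_pairs(string):
--     pairs = find_pairs_of_letters(string)
--     i = 0
--     while i < (len(pairs)-1):
--         if pairs[i][0] == pairs[i][1] and pairs[i] == pairs[i+1]:
--             del pairs[i+1]
--         i += 1
--     return pairs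
-- ===== SOURCE B (Python) =====
-- def remove_overlapping_pairs(string):
--     # One forward pass over the string: emit each adjacent pair, and when three
--     # equal characters are met, skip the overlapping duplicate pair (no list mutation).
--     out = []
--     n = len(string)
--     j = 0
--     while j < n - 1:
--         out.append(string[j:j+2])
--         if j + 2 < n and string[j] == string[j+1] == string[j+2]:
--             j += 2
--         else:
--             j += 1
--     return out
-- ===== Notes on version B (the rewrite author's own statement) =====
-- stated objective: faster
-- what changed: A builds a pair list then repeatedly deletes the overlapping duplicate pair in place (each del shifts the list tail); B makes one forward pass over the string, emitting each adjacent pair and advancing the index by 2 when three equal characters make the next pair an overlapping duplicate, so no list is ever mutated.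
import Mathlib
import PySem

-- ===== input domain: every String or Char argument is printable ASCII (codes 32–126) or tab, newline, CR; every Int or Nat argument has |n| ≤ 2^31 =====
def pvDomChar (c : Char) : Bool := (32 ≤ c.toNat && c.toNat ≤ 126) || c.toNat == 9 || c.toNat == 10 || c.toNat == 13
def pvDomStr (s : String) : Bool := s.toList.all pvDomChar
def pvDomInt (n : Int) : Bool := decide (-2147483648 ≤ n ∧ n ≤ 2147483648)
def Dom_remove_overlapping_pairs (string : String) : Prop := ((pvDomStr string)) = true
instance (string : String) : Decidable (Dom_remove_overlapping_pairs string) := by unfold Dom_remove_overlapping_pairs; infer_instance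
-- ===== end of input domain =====

-- B replaces A's in-place deletion loop over a pre-built pair list by one forward
-- pass over the string that skips the overlapping duplicate pair directly (objective: faster).
-- Both ports work on List Char (two-char Python strings are two-element char lists,
-- exact on the domain) and convert to String with String.ofList only at the return.

-- ===== PORT A =====
-- Loops are ported as structural recursion on a fuel counter (fuel = list length
-- bounds the remaining iterations; it only makes the recursion structural, the
-- computation is the Python's on every input).
-- while i < len(string)-1: pairs.append(string[i] + string[i+1]); i += 1
def pvPairsLoopA (s : List Char) : Nat → Nat → List (List Char) → List (List Char)
  | 0, _, acc => acc
  | fuel + 1, i, acc =>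
    if i < s.length - 1 then
      pvPairsLoopA s fuel (i + 1) (acc ++ [[s.getD i ' ', s.getD (i + 1) ' ']])
    else acc

-- while i < len(pairs)-1: if pairs[i][0]==pairs[i][1] and pairs[i]==pairs[i+1]: del pairs[i+1]; i += 1
def pvDelLoopA : Nat → List (List Char) → Nat → List (List Char)
  | 0, pairs, _ => pairs
  | fuel + 1, pairs, i =>
    if i < pairs.length - 1 then
      if (pairs.getD i []).getD 0 ' ' = (pairs.getD i []).getD 1 ' ' ∧
         pairs.getD i [] = pairs.getD (i + 1) [] then
        pvDelLoopA fuel (pairs.eraseIdx (i + 1)) (i + 1)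
      else
        pvDelLoopA fuel pairs (i + 1)
    else pairs

def remove_overlapping_pairs (string : String) : List String :=
  let pairs := pvPairsLoopA string.toList string.toList.length 0 []
  (pvDelLoopA pairs.length pairs 0).map String.ofList

-- ===== PORT B =====
-- while j < n-1: out.append(string[j:j+2]); j += 2 if (j+2 < n and s[j]==s[j+1]==s[j+2]) else 1
-- (string[j:j+2] with 0 ≤ j < n-1 is exactly the two chars at j, j+1: take 2 of drop j)
def pvAltLoopB (s : List Char) : Nat → Nat → List (List Char)
  | 0, _ => []
  | fuel + 1, j =>
    if j < s.length - 1 then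
      ((s.drop j).take 2) ::
        (if j + 2 < s.length ∧ s.getD j ' ' = s.getD (j + 1) ' ' ∧
            s.getD (j + 1) ' ' = s.getD (j + 2) ' ' then
          pvAltLoopB s fuel (j + 2)
        else
          pvAltLoopB s fuel (j + 1))
    else []

def remove_overlapping_pairs_alt (string : String) : List String :=
  (pvAltLoopB string.toList string.toList.length 0).map String.ofList

-- ===== PRECONDITION & SPEC =====
def Spec_remove_overlapping_pairs (string : String) (out : List String) : Prop := out = remove_overlapping_pairs_alt string
instance (string : String) (out : List String) : Decidable (Spec_remove_overlapping_pairs string out) := by unfold Spec_remove_overlapping_pairs; infer_instance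

-- ===== CLAIM (what is proved, stated in full; the proofs are below) =====
def Claim_equal_remove_overlapping_pairs : Prop := ∀ (string : String), Dom_remove_overlapping_pairs string → Spec_remove_overlapping_pairs string (remove_overlapping_pairs string)

-- ===== LEMMAS AND PROOFS =====

-- structural pair builder: the value pvPairsLoopA accumulates
def pvPairs : List Char → List (List Char)
  | a :: b :: rest => [a, b] :: pvPairs (b :: rest)
  | _ => []

-- structural form of A's deletion loop on the yet-unscanned suffix
def pvScan : List (List Char) → List (List Char)
  | p :: q :: rest =>
      if p.getD 0 ' ' = p.getD 1 ' ' ∧ p = q then p :: pvScan rest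
      else p :: pvScan (q :: rest)
  | l => l

lemma pvScan_short (l : List (List Char)) (h : l.length ≤ 1) : pvScan l = l := by
  match l, h with
  | [], _ => rfl
  | [p], _ => rfl

lemma pvPairs_short (s : List Char) (h : s.length ≤ 1) : pvPairs s = [] := by
  match s, h with
  | [], _ => rfl
  | [a], _ => rfl

lemma pvPairsLoopA_eq (s : List Char) :
    ∀ fuel i acc, s.length - i ≤ fuel →
      pvPairsLoopA s fuel i acc = acc ++ pvPairs (s.drop i) := by
  intro fuel
  induction fuel with
  | zero =>
    intro i acc hf
    have h : ¬ i < s.length - 1 := by omega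
    rw [pvPairsLoopA]
    have hs : (s.drop i).length ≤ 1 := by simp; omega
    rw [pvPairs_short _ hs, List.append_nil]
  | succ fuel ih =>
    intro i acc hf
    rw [pvPairsLoopA]
    by_cases h : i < s.length - 1
    · have h1 : i < s.length := by omega
      have h2 : i + 1 < s.length := by omega
      have hd : s.drop i = s[i] :: s[i+1] :: s.drop (i + 2) := by
        rw [List.drop_eq_getElem_cons h1, List.drop_eq_getElem_cons h2]
      rw [if_pos h, ih (i + 1) _ (by omega), hd]
      show _ = acc ++ (_ :: pvPairs (s[i+1] :: s.drop (i+2)))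
      rw [List.drop_eq_getElem_cons h2]
      simp [List.getElem?_eq_getElem h1, List.getElem?_eq_getElem h2]
    · rw [if_neg h]
      have hs : (s.drop i).length ≤ 1 := by simp; omega
      rw [pvPairs_short _ hs, List.append_nil]

lemma pvDelLoopA_eq :
    ∀ fuel pairs i, pairs.length - i ≤ fuel →
      pvDelLoopA fuel pairs i = pairs.take i ++ pvScan (pairs.drop i) := by
  intro fuel
  induction fuel with
  | zero =>
    intro pairs i hf
    rw [pvDelLoopA]
    have hs : (pairs.drop i).length ≤ 1 := by simp; omega
    rw [pvScan_short _ hs, List.take_append_drop]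
  | succ fuel ih =>
    intro pairs i hf
    rw [pvDelLoopA]
    by_cases h : i < pairs.length - 1
    · have h1 : i < pairs.length := by omega
      have h2 : i + 1 < pairs.length := by omega
      have hd : pairs.drop i = pairs[i] :: pairs[i+1] :: pairs.drop (i + 2) := by
        rw [List.drop_eq_getElem_cons h1, List.drop_eq_getElem_cons h2]
      have hgi : pairs.getD i [] = pairs[i] := List.getD_eq_getElem _ _ h1
      have hgi1 : pairs.getD (i + 1) [] = pairs[i+1] := List.getD_eq_getElem _ _ h2
      rw [if_pos h, hgi, hgi1]
      by_cases hc : pairs[i].getD 0 ' ' = pairs[i].getD 1 ' ' ∧ pairs[i] = pairs[i+1]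
      · rw [if_pos hc]
        have hlen : (pairs.eraseIdx (i + 1)).length = pairs.length - 1 :=
          List.length_eraseIdx_of_lt h2
        rw [ih _ (i + 1) (by omega)]
        have he : pairs.eraseIdx (i + 1) = pairs.take (i + 1) ++ pairs.drop (i + 2) :=
          List.eraseIdx_eq_take_drop_succ pairs (i + 1)
        have htk : (pairs.eraseIdx (i + 1)).take (i + 1) = pairs.take (i + 1) := by
          rw [he, List.take_append_of_le_length (by simp; omega), List.take_take]
          simp
        have hdr : (pairs.eraseIdx (i + 1)).drop (i + 1) = pairs.drop (i + 2) := by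
          rw [he, List.drop_append_of_le_length (by simp; omega)]
          simp
        rw [htk, hdr, hd, pvScan, if_pos hc, List.take_add_one, List.append_assoc]
        simp [List.getElem?_eq_getElem h1]
      · rw [if_neg hc, ih _ (i + 1) (by omega), hd, pvScan, if_neg hc,
            List.drop_eq_getElem_cons h2, List.take_add_one, List.append_assoc]
        simp [List.getElem?_eq_getElem h1]
    · rw [if_neg h]
      have hs : (pairs.drop i).length ≤ 1 := by simp; omega
      rw [pvScan_short _ hs, List.take_append_drop]

lemma pvAltLoopB_eq (s : List Char) :
    ∀ fuel j, s.length - j ≤ fuel →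
      pvAltLoopB s fuel j = pvScan (pvPairs (s.drop j)) := by
  intro fuel
  induction fuel with
  | zero =>
    intro j hf
    rw [pvAltLoopB]
    have hs : (s.drop j).length ≤ 1 := by simp; omega
    rw [pvPairs_short _ hs]
    rfl
  | succ fuel ih =>
    intro j hf
    rw [pvAltLoopB]
    by_cases h : j < s.length - 1
    · have h1 : j < s.length := by omega
      have h2 : j + 1 < s.length := by omega
      have hd : s.drop j = s[j] :: s[j+1] :: s.drop (j + 2) := by
        rw [List.drop_eq_getElem_cons h1, List.drop_eq_getElem_cons h2]
      have hg : s.getD j ' ' = s[j] := List.getD_eq_getElem _ _ h1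
      have hg1 : s.getD (j + 1) ' ' = s[j+1] := List.getD_eq_getElem _ _ h2
      have htake : (s.drop j).take 2 = [s[j], s[j+1]] := by rw [hd]; rfl
      rw [if_pos h, htake, hg, hg1]
      by_cases h3 : j + 2 < s.length
      · have hg2 : s.getD (j + 2) ' ' = s[j+2] := List.getD_eq_getElem _ _ h3
        have hd2 : s.drop (j + 2) = s[j+2] :: s.drop (j + 3) := List.drop_eq_getElem_cons h3
        rw [hg2]
        by_cases hc : s[j] = s[j+1] ∧ s[j+1] = s[j+2]
        · rw [if_pos ⟨h3, hc.1, hc.2⟩, ih (j + 2) (by omega), hd, hd2,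
              pvPairs, pvPairs, pvScan, if_pos (by simp [hc.1, hc.2])]
        · rw [if_neg (by tauto), ih (j + 1) (by omega), hd, hd2,
              pvPairs, pvPairs, pvScan,
              if_neg (by simp; intro hab; rcases hc with hc; tauto),
              List.drop_eq_getElem_cons h2, hd2, pvPairs]
      · have hnil : s.drop (j + 2) = [] := List.drop_eq_nil_of_le (by omega)
        rw [if_neg (by tauto), ih (j + 1) (by omega), hd, hnil, pvPairs,
            List.drop_eq_getElem_cons h2, hnil]
        rfl
    · rw [if_neg h]
      have hs : (s.drop j).length ≤ 1 := by simp; omega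
      rw [pvPairs_short _ hs]
      rfl

-- ===== VERDICT (by name: the statement is the Claim_ definition above) =====
theorem remove_overlapping_pairs_spec : Claim_equal_remove_overlapping_pairs := by
  intro s _
  show _ = _
  rw [remove_overlapping_pairs, remove_overlapping_pairs_alt]
  rw [pvPairsLoopA_eq _ _ _ _ (by omega), pvAltLoopB_eq _ _ _ (by omega),
      pvDelLoopA_eq _ _ _ (by omega)]
  simp
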